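-- pv_equiv track=rewrite | github.com/cfhaiteeh/PG-GSQL | preprocess_data.py | from_swap
-- ===== SOURCE A (Python) =====
-- def from_swap(sql_tks,input_schema,pre_tks):
--   if len(pre_tks)==0:
--     return sql_tks,0
--   tabs = [x.lower() for x in input_schema['table_names_original']]
--   n_f = ('select',  'where', 'group', 'order', 'limit', 'intersect', 'union', 'except', 'end', 'having')
--   s1=[]
--   s2=[]
--   flag=0
--   n_tks=[]
--   sql_tks.append('end')
--   for x in sql_tks:
--
--     if flag==1 and x in n_f:
--       flag=0
--       for tt in s1:
--         n_tks.append(tt)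
--       for tt in s2:
--         n_tks.append(tt)
--       s1=[]
--       s2=[]
--
--     if x in tabs and flag==1:
--       if x in pre_tks:
--         s1.append(x)
--       else:
--         s2.append(x)
--     if flag == 0:
--       n_tks.append(x)
--
--     if x == 'from':
--       flag = 1
--   _=0
--   if n_tks!=sql_tks:
--
--     _+=1
--   return n_tks[:-1],_
-- ===== SOURCE B (Python) =====
-- def from_swap(sql_tks, input_schema, pre_tks):
--     # NOTE: like A, this mutates sql_tks by appending 'end' when pre_tks is non-empty.
--     if len(pre_tks) == 0:
--         return sql_tks, 0
--     tabs = [x.lower() for x in input_schema['table_names_original']]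
--     clause = ('select', 'where', 'group', 'order', 'limit', 'intersect',
--               'union', 'except', 'end', 'having')
--     sql_tks.append('end')
--     # Staged slicing: locate each 'from', slice out its clause body up to the first
--     # clause keyword, and rebuild that body declaratively with filters.
--     n_tks = []
--     rest = sql_tks
--     while 'from' in rest:
--         j = rest.index('from')
--         n_tks += rest[:j + 1]
--         rest = rest[j + 1:]
--         k = next(i for i, t in enumerate(rest) if t in clause)  # trailing 'end' guarantees one
--         body = [t for t in rest[:k] if t in tabs]
--         n_tks += [t for t in body if t in pre_tks] + [t for t in body if t not in pre_tks]
--         rest = rest[k:]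
--     n_tks += rest
--     changed = 1 if n_tks != sql_tks else 0
--     return n_tks[:-1], changed
-- ===== Notes on version B (the rewrite author's own statement) =====
-- stated objective: alternative
-- what changed: Replaces A's token-by-token state machine (mode flag, dual buffers, deferred flush) by staged slicing: find each 'from' with index(), slice out the clause body up to the first clause keyword, and rebuild it declaratively with filter comprehensions.
import Mathlib
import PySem

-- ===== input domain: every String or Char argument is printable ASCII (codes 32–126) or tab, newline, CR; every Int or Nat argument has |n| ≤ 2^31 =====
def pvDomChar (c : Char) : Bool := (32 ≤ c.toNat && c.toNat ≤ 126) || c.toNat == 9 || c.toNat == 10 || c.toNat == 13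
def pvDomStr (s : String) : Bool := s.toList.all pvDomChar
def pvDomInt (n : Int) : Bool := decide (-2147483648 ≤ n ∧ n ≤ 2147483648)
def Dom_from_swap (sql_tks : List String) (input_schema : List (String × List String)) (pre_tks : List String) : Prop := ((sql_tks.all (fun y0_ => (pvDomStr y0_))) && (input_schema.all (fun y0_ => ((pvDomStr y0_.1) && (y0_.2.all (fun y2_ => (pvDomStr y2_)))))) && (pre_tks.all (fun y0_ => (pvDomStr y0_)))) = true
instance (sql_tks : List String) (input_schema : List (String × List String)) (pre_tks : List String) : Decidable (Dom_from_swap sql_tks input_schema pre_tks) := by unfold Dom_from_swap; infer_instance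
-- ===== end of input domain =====

-- B replaces A's token-by-token mode-flag state machine by staged slicing: locate each 'from',
-- slice out the clause body up to the first clause keyword, rebuild it with filters (same cost,
-- different decomposition). Both A and B mutate sql_tks (append 'end') when pre_tks ≠ []; the
-- equivalence proved here is about the return value.

-- ===== PORT A =====
-- the clause-keyword tuple n_f of A (B uses the same literal as 'clause')
def pvNF : List String :=
  ["select", "where", "group", "order", "limit", "intersect", "union", "except", "end", "having"]

-- one iteration of A's for-loop; state = (s1, s2, flag, n_tks)
def stepA (tabs pre : List String) (st : List String × List String × Int × List String) (x : String) :
    List String × List String × Int × List String :=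
  let s1 := st.1
  let s2 := st.2.1
  let flag := st.2.2.1
  let n_tks := st.2.2.2
  let r1 : List String × List String × Int × List String :=
    if flag == 1 && pvNF.contains x then ([], [], (0 : Int), n_tks ++ s1 ++ s2)
    else (s1, s2, flag, n_tks)
  let s1 := r1.1
  let s2 := r1.2.1
  let flag := r1.2.2.1
  let n_tks := r1.2.2.2
  let r2 : List String × List String :=
    if tabs.contains x && flag == 1 then
      if pre.contains x then (s1 ++ [x], s2) else (s1, s2 ++ [x])
    else (s1, s2)
  let s1 := r2.1
  let s2 := r2.2
  let n_tks := if flag == 0 then n_tks ++ [x] else n_tks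
  let flag := if x == "from" then (1 : Int) else flag
  (s1, s2, flag, n_tks)

def from_swap (sql_tks : List String) (input_schema : List (String × List String)) (pre_tks : List String) :
    List String × Int :=
  if pre_tks.length == 0 then (sql_tks, 0)
  else
    match (PySem.Dict.mk input_schema).get? "table_names_original" with
    | none => (sql_tks, 0)  -- Python raises KeyError here; excluded by Pre_from_swap
    | some tns =>
      let tabs := tns.map (fun x => PySem.Str.lower x)
      let sql' := sql_tks ++ ["end"]          -- sql_tks.append('end')
      let st := sql'.foldl (stepA tabs pre_tks) ([], [], 0, [])
      let n_tks := st.2.2.2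
      let u : Int := if n_tks ≠ sql' then 1 else 0
      (PySem.List.slice n_tks none (some (-1)), u)

-- ===== PORT B =====
-- termination helper for buildB (cited by name in decreasing_by)
theorem buildB_term (rest : List String) (h : "from" ∈ rest) :
    ((rest.dropWhile (fun y => !(y == "from"))).tail.dropWhile (fun y => !pvNF.contains y)).length
      < rest.length := by
  have h1 : rest.dropWhile (fun y => !(y == "from")) ≠ [] := by
    intro he
    have := List.dropWhile_eq_nil_iff.mp he "from" h
    simp at this
  have h2 := List.length_dropWhile_le (p := fun y => !(y == "from")) (l := rest)
  have h3 := List.length_dropWhile_le (p := fun y => !pvNF.contains y)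
    (l := (rest.dropWhile (fun y => !(y == "from"))).tail)
  have h4 : (rest.dropWhile (fun y => !(y == "from"))).tail.length + 1
      = (rest.dropWhile (fun y => !(y == "from"))).length := by
    cases hc : rest.dropWhile (fun y => !(y == "from")) with
    | nil => exact absurd hc h1
    | cons a as => simp
  omega

-- B's loop: each round slices 'rest' at the first 'from' (rest[:j+1] / rest[j+1:] ported as
-- takeWhile/dropWhile on ≠'from' — exact, since rest.index('from') is the length of that
-- takeWhile), then at the first clause keyword, and rebuilds the clause body with filters.
def buildB (tabs pre : List String) (rest : List String) : List String :=
  if h : "from" ∈ rest then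
    let p := rest.takeWhile (fun y => !(y == "from"))
    let r2 := (rest.dropWhile (fun y => !(y == "from"))).tail
    let seg := r2.takeWhile (fun y => !pvNF.contains y)
    let r3 := r2.dropWhile (fun y => !pvNF.contains y)
    let body := seg.filter (fun t => tabs.contains t)
    p ++ ["from"] ++ body.filter (fun t => pre.contains t) ++ body.filter (fun t => !pre.contains t)
      ++ buildB tabs pre r3
  else rest
termination_by rest.length
decreasing_by exact buildB_term rest h

def from_swap_alt (sql_tks : List String) (input_schema : List (String × List String)) (pre_tks : List String) :
    List String × Int :=
  if pre_tks.length == 0 then (sql_tks, 0)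
  else
    match (PySem.Dict.mk input_schema).get? "table_names_original" with
    | none => (sql_tks, 0)  -- Python raises KeyError here; excluded by Pre_from_swap
    | some tns =>
      let tabs := tns.map (fun x => PySem.Str.lower x)
      let sql' := sql_tks ++ ["end"]          -- sql_tks.append('end')
      let n_tks := buildB tabs pre_tks sql'
      let changed : Int := if n_tks ≠ sql' then 1 else 0
      (PySem.List.slice n_tks none (some (-1)), changed)

-- ===== PRECONDITION & SPEC =====
-- Pre_ excludes only inputs where Python A raises (KeyError: pre_tks non-empty and the schema dict
-- lacks the key 'table_names_original'); B raises there too.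
def Pre_from_swap (sql_tks : List String) (input_schema : List (String × List String)) (pre_tks : List String) : Prop :=
  pre_tks = [] ∨ ((PySem.Dict.mk input_schema).get? "table_names_original").isSome
instance (sql_tks : List String) (input_schema : List (String × List String)) (pre_tks : List String) :
    Decidable (Pre_from_swap sql_tks input_schema pre_tks) := by unfold Pre_from_swap; infer_instance

def pvWitness_from_swap : List String × (List (String × List String)) × List String :=
  (["select", "a", "from", "t2", "t1", "where"], [("table_names_original", ["t1", "t2"])], ["t1"])

def Spec_from_swap (sql_tks : List String) (input_schema : List (String × List String)) (pre_tks : List String) (out : List String × Int) : Prop := out = from_swap_alt sql_tks input_schema pre_tks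
instance (sql_tks : List String) (input_schema : List (String × List String)) (pre_tks : List String) (out : List String × Int) : Decidable (Spec_from_swap sql_tks input_schema pre_tks out) := by unfold Spec_from_swap; infer_instance

-- ===== CLAIM (what is proved, stated in full; the proofs are below) =====
def Claim_equal_from_swap : Prop := ∀ (sql_tks : List String) (input_schema : List (String × List String)) (pre_tks : List String), Dom_from_swap sql_tks input_schema pre_tks → Pre_from_swap sql_tks input_schema pre_tks → Spec_from_swap sql_tks input_schema pre_tks (from_swap sql_tks input_schema pre_tks)

-- ===== LEMMAS AND PROOFS =====

theorem getLast?_cons_ne {a : Type} (y : a) (ys : List a) (h : ys ≠ []) :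
    (y :: ys).getLast? = ys.getLast? := by
  cases ys with
  | nil => exact absurd rfl h
  | cons b bs => simp [List.getLast?_cons]

theorem nf_end : "end" ∈ pvNF := by decide
theorem nf_not_from (k : String) (h : k ∈ pvNF) : k ≠ "from" := by
  intro hk
  subst hk
  revert h
  decide

-- unfolding buildB past a non-'from' head token
theorem buildB_cons_ne (tabs pre : List String) (y : String) (ys : List String) (hy : y ≠ "from") :
    buildB tabs pre (y :: ys) = y :: buildB tabs pre ys := by
  by_cases hm : "from" ∈ ys
  · rw [buildB, buildB]
    have hm' : "from" ∈ y :: ys := List.mem_cons_of_mem y hm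
    have hyb : (!(y == "from")) = true := by simp [hy]
    simp [hm, hm', List.takeWhile_cons, List.dropWhile_cons, hyb]
  · have hm' : "from" ∉ y :: ys := by
      simp only [List.mem_cons, not_or]
      exact ⟨fun h => hy h.symm, hm⟩
    rw [buildB, buildB]
    simp [hm, hm']

-- A's loop in table-collection mode (flag = 1) consumes exactly the clause body
-- (= takeWhile up to the first clause keyword), flushing B's two filters plus the terminator
theorem foldA_flag1 (tabs pre : List String) (l : List String) (hl : l.getLast? = some "end") :
    ∀ s1 s2 acc, ∃ k kr, l.dropWhile (fun y => !pvNF.contains y) = k :: kr ∧ k ∈ pvNF ∧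
      (k :: kr).getLast? = some "end" ∧
      l.foldl (stepA tabs pre) (s1, s2, 1, acc) =
        kr.foldl (stepA tabs pre)
          ([], [], 0, acc ++
            (s1 ++ (((l.takeWhile (fun y => !pvNF.contains y)).filter
                (fun t => tabs.contains t)).filter (fun t => pre.contains t))) ++
            (s2 ++ (((l.takeWhile (fun y => !pvNF.contains y)).filter
                (fun t => tabs.contains t)).filter (fun t => !pre.contains t))) ++ [k]) := by
  induction l with
  | nil => simp at hl
  | cons y ys ih =>
    intro s1 s2 acc
    by_cases hy : y ∈ pvNF
    · refine ⟨y, ys, by simp [List.dropWhile_cons, List.contains_eq_mem, hy], hy, hl, ?_⟩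
      have hyf : (y == "from") = false := by simp [nf_not_from y hy]
      simp only [List.foldl_cons]
      rw [show stepA tabs pre (s1, s2, 1, acc) y = ([], [], 0, acc ++ s1 ++ s2 ++ [y]) by
        simp [stepA, List.contains_eq_mem, hy, hyf]]
      simp [List.takeWhile_cons, List.contains_eq_mem, hy]
    · have hys : ys ≠ [] := by
        rintro rfl
        simp at hl
        subst hl
        exact hy nf_end
      have hl' : ys.getLast? = some "end" := by
        rwa [getLast?_cons_ne y ys hys] at hl
      have hync : (pvNF.contains y) = false := by simp [List.contains_eq_mem, hy]
      simp only [List.foldl_cons, List.dropWhile_cons, List.takeWhile_cons, hync,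
        Bool.not_false, if_true]
      by_cases ht : y ∈ tabs
      · by_cases hp : y ∈ pre
        · obtain ⟨k, kr, hk, hNF, hke, he⟩ := ih hl' (s1 ++ [y]) s2 acc
          refine ⟨k, kr, hk, hNF, hke, ?_⟩
          rw [show stepA tabs pre (s1, s2, 1, acc) y = (s1 ++ [y], s2, 1, acc) by
            simp [stepA, List.contains_eq_mem, hy, ht, hp]]
          rw [he]
          simp [List.contains_eq_mem, ht, hp]
        · obtain ⟨k, kr, hk, hNF, hke, he⟩ := ih hl' s1 (s2 ++ [y]) acc
          refine ⟨k, kr, hk, hNF, hke, ?_⟩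
          rw [show stepA tabs pre (s1, s2, 1, acc) y = (s1, s2 ++ [y], 1, acc) by
            simp [stepA, List.contains_eq_mem, hy, ht, hp]]
          rw [he]
          simp [List.contains_eq_mem, ht, hp]
      · obtain ⟨k, kr, hk, hNF, hke, he⟩ := ih hl' s1 s2 acc
        refine ⟨k, kr, hk, hNF, hke, ?_⟩
        rw [show stepA tabs pre (s1, s2, 1, acc) y = (s1, s2, 1, acc) by
          simp [stepA, List.contains_eq_mem, hy, ht]]
        rw [he]
        simp [List.contains_eq_mem, ht]

-- A's loop starting in copy mode (flag = 0) builds exactly B's staged-slicing output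
theorem foldA_flag0 (tabs pre : List String) :
    ∀ (n : Nat) (l : List String), l.length ≤ n → (l = [] ∨ l.getLast? = some "end") →
      ∀ acc, (l.foldl (stepA tabs pre) ([], [], 0, acc)).2.2.2 = acc ++ buildB tabs pre l := by
  intro n
  induction n with
  | zero =>
    intro l hn _ acc
    have hnil : l = [] := List.eq_nil_of_length_eq_zero (Nat.le_zero.mp hn)
    subst hnil
    simp [buildB]
  | succ n ih =>
    intro l hn hl acc
    match l with
    | [] => simp [buildB]
    | x :: xs =>
      have hlast : (x :: xs).getLast? = some "end" := by
        rcases hl with h | h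
        · exact absurd h (by simp)
        · exact h
      by_cases hx : x = "from"
      · subst hx
        have hxs : xs ≠ [] := by
          rintro rfl
          simp at hlast
        have hxl : xs.getLast? = some "end" := by
          rwa [getLast?_cons_ne _ xs hxs] at hlast
        obtain ⟨k, kr, hk, hNF, hkl, he⟩ := foldA_flag1 tabs pre xs hxl [] [] (acc ++ ["from"])
        have hstep : stepA tabs pre ([], [], 0, acc) "from" = ([], [], 1, acc ++ ["from"]) := by
          simp [stepA]
        have hkr : kr = [] ∨ kr.getLast? = some "end" := by
          match kr with
          | [] => exact Or.inl rfl
          | a :: as =>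
            right
            rwa [getLast?_cons_ne k (a :: as) (by simp)] at hkl
        have hkrlen : kr.length ≤ n := by
          have h1 := List.length_dropWhile_le (p := fun y => !pvNF.contains y) (l := xs)
          rw [hk] at h1
          simp only [List.length_cons] at h1 hn ⊢
          omega
        have hbuild : buildB tabs pre ("from" :: xs) =
            "from" :: ((((xs.takeWhile (fun y => !pvNF.contains y)).filter
                (fun t => tabs.contains t)).filter (fun t => pre.contains t)) ++
              (((xs.takeWhile (fun y => !pvNF.contains y)).filter
                (fun t => tabs.contains t)).filter (fun t => !pre.contains t)) ++
              (k :: buildB tabs pre kr)) := by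
          rw [buildB]
          have hm : "from" ∈ "from" :: xs := List.mem_cons_self
          simp only [hm, dif_pos]
          rw [show ("from" :: xs).takeWhile (fun y => !(y == "from")) = [] by
            simp [List.takeWhile_cons]]
          rw [show ("from" :: xs).dropWhile (fun y => !(y == "from")) = "from" :: xs by
            simp [List.dropWhile_cons]]
          simp only [List.tail_cons, hk]
          rw [buildB_cons_ne tabs pre k kr (nf_not_from k hNF)]
          simp
        rw [List.foldl_cons, hstep, he, ih kr hkrlen hkr, hbuild]
        simp
      · have hxeq : (x == "from") = false := by simp [hx]
        have hstep : stepA tabs pre ([], [], 0, acc) x = ([], [], 0, acc ++ [x]) := by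
          simp [stepA, hxeq]
        have hxsl : xs = [] ∨ xs.getLast? = some "end" := by
          match xs with
          | [] => exact Or.inl rfl
          | a :: as =>
            right
            rwa [getLast?_cons_ne x (a :: as) (by simp)] at hlast
        have hxslen : xs.length ≤ n := by
          simp only [List.length_cons] at hn
          omega
        rw [List.foldl_cons, hstep, ih xs hxslen hxsl, buildB_cons_ne tabs pre x xs hx]
        simp

-- ===== VERDICT (by name: the statement is the Claim_ definition above) =====
theorem from_swap_spec : Claim_equal_from_swap := by
  intro sql_tks input_schema pre_tks _ _
  unfold Spec_from_swap from_swap from_swap_alt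
  by_cases hp : pre_tks.length == 0
  · simp [hp]
  · simp only [hp, Bool.false_eq_true, if_false]
    match (PySem.Dict.mk input_schema).get? "table_names_original" with
    | none => rfl
    | some tns =>
      simp only
      have hkey : (sql_tks ++ ["end"]).getLast? = some "end" := by
        simp
      rw [foldA_flag0 (tns.map (fun x => PySem.Str.lower x)) pre_tks
        (sql_tks ++ ["end"]).length (sql_tks ++ ["end"]) le_rfl (Or.inr hkey) []]
      simp
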